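-- pv_equiv track=rewrite | github.com/matos1396/PS-Einstein | Case-2/Review/questao_2_review.py | questao_2_A
-- ===== SOURCE A (Python) =====
-- def questao_2_A(lista):
--
--     dicionario = dict.fromkeys(lista, 0) # Cria um dicionário com Key = elemento da lista e Valor = 0
--
--     # Atribui a frequência de cada elemento da lista no Valor correspondente de cada Key do dicionário.
--     for nota in lista:
--         dicionario[nota] += 1
--
--     max_freq = max(dicionario.values()) # Retorna a frequência do elemento(s) mais comum
--
--     # Percorre os items do dicionario e salva na lista_temp o valor dos maiores elemento mais frequentes
--     lista_temp = []
--     for nota, freq in dicionario.items():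
--         if freq == max_freq:
--             lista_temp.append(nota)
--
--     # Seleciona o maior valor que corresponde a resposta esperada
--     resposta = max(lista_temp)
--     return resposta
-- ===== SOURCE B (Python) =====
-- def questao_2_A(lista):
--     s = sorted(lista)
--     best_val = s[0]
--     best_count = 0
--     n = len(s)
--     i = 0
--     while i < n:
--         j = i + 1
--         while j < n and s[j] == s[i]:
--             j += 1
--         count = j - i
--         if best_count <= count:
--             best_count = count
--             best_val = s[i]
--         i = j
--     return best_val
-- ===== Notes on version B (the rewrite author's own statement) =====
-- stated objective: alternative
-- what changed: Replaced the dict-frequency table, max over values, filter pass and final max by a single sort followed by one scan over maximal runs of equal values, where '<=' over ascending runs resolves ties to the larger value.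
import Mathlib
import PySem

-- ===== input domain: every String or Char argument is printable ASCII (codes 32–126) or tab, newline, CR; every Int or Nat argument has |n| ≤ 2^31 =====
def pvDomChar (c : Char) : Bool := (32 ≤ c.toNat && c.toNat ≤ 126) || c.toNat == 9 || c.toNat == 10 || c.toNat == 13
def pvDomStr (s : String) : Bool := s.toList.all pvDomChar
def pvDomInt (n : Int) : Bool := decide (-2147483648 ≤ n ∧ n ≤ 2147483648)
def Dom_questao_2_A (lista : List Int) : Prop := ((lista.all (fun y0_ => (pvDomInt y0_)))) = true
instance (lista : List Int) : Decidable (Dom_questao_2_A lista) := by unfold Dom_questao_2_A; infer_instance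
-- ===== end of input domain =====

-- B replaces A's dict-counter + filter + two max passes by sort-then-run-scan (ties resolve to the
-- larger value via `<=` over the ascending runs); objective: alternative algorithm of similar cost.


-- ===== PORT A =====
-- literal port of A: dict.fromkeys, counting loop, max of values, filter loop, max of the filtered list.
-- Python's max(...) raises ValueError on an empty sequence; PySem.List.max? is none exactly there, and
-- Pre_questao_2_A excludes that input, so the `.getD 0` default is never the result on the claimed domain.
def questao_2_A (lista : List Int) : Int :=
  let dicionario := lista.foldl (fun d k => d.insert k (0 : Int)) PySem.Dict.empty
  let dicionario := lista.foldl (fun d nota => d.modify nota 0 (· + 1)) dicionario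
  let max_freq := (PySem.List.max? dicionario.values (fun v => v)).getD 0
  let lista_temp := dicionario.items.foldl
    (fun acc p => if p.2 == max_freq then acc ++ [p.1] else acc) ([] : List Int)
  (PySem.List.max? lista_temp (fun v => v)).getD 0

-- ===== PORT B =====
-- port of Source B: the outer while-loop over the sorted list; the inner `while s[j] == s[i]` advance is
-- the takeWhile/dropWhile split of the current run, `count = j - i` is the run length.
def pvRunsQ2 (best : Int) (bestc : Nat) : List Int → Int
  | [] => best
  | x :: rest =>
    let run := rest.takeWhile (fun y => y == x)
    let count := run.length + 1
    let rest' := rest.dropWhile (fun y => y == x)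
    if bestc ≤ count then pvRunsQ2 x count rest' else pvRunsQ2 best bestc rest'
termination_by l => l.length
decreasing_by all_goals simp only [List.length_cons]; exact Nat.lt_succ_of_le (List.length_dropWhile_le _ _)

-- Source B raises IndexError at s[0] on the empty list (outside Pre_); the port returns 0 there.
def questao_2_A_alt (lista : List Int) : Int :=
  match PySem.List.sorted lista (fun x => x) false with
  | [] => 0
  | x :: t => pvRunsQ2 x 0 (x :: t)

-- ===== PRECONDITION & SPEC =====
-- Python A raises ValueError (max of an empty sequence) exactly on the empty list.
def Pre_questao_2_A (lista : List Int) : Prop := lista ≠ []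
instance (lista : List Int) : Decidable (Pre_questao_2_A lista) := by unfold Pre_questao_2_A; infer_instance
def pvWitness_questao_2_A : List Int := ([1, 2, 2])

def Spec_questao_2_A (lista : List Int) (out : Int) : Prop := out = questao_2_A_alt lista
instance (lista : List Int) (out : Int) : Decidable (Spec_questao_2_A lista out) := by unfold Spec_questao_2_A; infer_instance

-- ===== CLAIM (what is proved, stated in full; the proofs are below) =====
def Claim_equal_questao_2_A : Prop := ∀ (lista : List Int), Dom_questao_2_A lista → Pre_questao_2_A lista → Spec_questao_2_A lista (questao_2_A lista)

-- ===== LEMMAS AND PROOFS =====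
-- Both programs return THE element r of lista with lexicographically maximal (count r, r):
def IsBestQ2 (l : List Int) (r : Int) : Prop :=
  r ∈ l ∧ ∀ u ∈ l, l.count u < l.count r ∨ (l.count u = l.count r ∧ u ≤ r)

theorem isBestQ2_unique {l : List Int} {r w : Int} (hr : IsBestQ2 l r) (hw : IsBestQ2 l w) : r = w := by
  rcases hr with ⟨hrm, hrb⟩
  rcases hw with ⟨hwm, hwb⟩
  rcases hrb w hwm with h1 | ⟨_, h1⟩ <;> rcases hwb r hrm with h2 | ⟨_, h2⟩ <;> omega

-- A's result is the greatest most-frequent element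
theorem A_isBest (lista : List Int) (h : lista ≠ []) : IsBestQ2 lista (questao_2_A lista) := by
  simp only [questao_2_A]
  set d0 := lista.foldl (fun d k => d.insert k (0 : Int)) PySem.Dict.empty with hd0
  set d := lista.foldl (fun d nota => d.modify nota 0 (· + 1)) d0 with hd
  have hd0keys : d0.keys = PySem.Set.ofList lista := by
    rw [hd0, PySem.Dict.keys_foldl_insert, PySem.Dict.keys_empty, PySem.Set.update_nil_left]
  have hd0getD : ∀ k, d0.getD k 0 = 0 := by
    rw [hd0]
    have hgen : ∀ (l : List Int) (dd : PySem.Dict Int Int), (∀ k, dd.getD k 0 = 0) →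
        ∀ k, (l.foldl (fun d k => d.insert k (0 : Int)) dd).getD k 0 = 0 := by
      intro l
      induction l with
      | nil => intro dd hdd k; simpa using hdd k
      | cons a l ihl =>
        intro dd hdd k
        simp only [List.foldl_cons]
        exact ihl _ (fun k' => by rw [PySem.Dict.getD_insert]; split <;> simp [hdd]) k
    exact hgen lista _ (fun k => by simp [PySem.Dict.getD_empty])
  have hdkeys : d.keys = PySem.Set.ofList lista := by
    rw [hd, PySem.Dict.keys_foldl_modify, hd0keys, PySem.Set.update_eq_append_filter]
    have hfil : ((PySem.Set.ofList lista).filter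
        (fun y => !(PySem.Set.contains (PySem.Set.ofList lista) y))) = [] := by
      apply List.filter_eq_nil_iff.mpr
      intro a ha
      simp [PySem.Set.contains_eq_listContains, ha]
    rw [hfil, List.append_nil]
  have hnodup : d.keys.Nodup := hdkeys ▸ PySem.Set.nodup_ofList lista
  have hgetD : ∀ k, d.getD k 0 = (lista.count k : Int) := by
    intro k
    rw [hd, PySem.Dict.getD_foldl_modify_add_one, hd0getD k, zero_add]
  have hvalues : d.values = (PySem.Set.ofList lista).map (fun k => (lista.count k : Int)) := by
    rw [PySem.Dict.values_eq_map_keys d hnodup 0, hdkeys]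
    exact List.map_congr_left (fun k _ => hgetD k)
  have hitems : d.items = (PySem.Set.ofList lista).map (fun k => (k, (lista.count k : Int))) := by
    rw [PySem.Dict.items_eq_map_keys d hnodup 0, hdkeys]
    exact List.map_congr_left (fun k _ => by rw [hgetD k])
  have hvne : d.values ≠ [] := by
    rw [hvalues]
    cases lista with
    | nil => exact absurd rfl h
    | cons a l =>
      have ha : a ∈ PySem.Set.ofList (a :: l) := (PySem.Set.mem_ofList _ _).mpr List.mem_cons_self
      exact fun he => by
        have := List.mem_map_of_mem (f := fun k => ((a :: l).count k : Int)) ha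
        rw [he] at this; simp at this
  obtain ⟨m, hm⟩ : ∃ m, PySem.List.max? d.values (fun v => v) = some m := by
    cases hmm : PySem.List.max? d.values (fun v => v) with
    | none => exact absurd ((PySem.List.max?_eq_none_iff _ _).mp hmm) hvne
    | some m => exact ⟨m, rfl⟩
  have hm_mem : m ∈ d.values := PySem.List.max?_mem hm
  have hm_max : ∀ y ∈ d.values, y ≤ m := by
    intro y hy; exact PySem.List.max?_isMax hm y hy
  rw [hm]
  simp only [Option.getD_some, hitems, List.foldl_map]
  rw [PySem.List.foldl_append_if (p := fun k => ((lista.count k : Int) == m)), List.nil_append]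
  simp only [List.map_id']
  set temp := (PySem.Set.ofList lista).filter (fun k => ((lista.count k : Int) == m)) with htemp
  have htempne : temp ≠ [] := by
    rw [hvalues] at hm_mem
    obtain ⟨k0, hk0, hk0m⟩ := List.mem_map.mp hm_mem
    have : k0 ∈ temp := by
      rw [htemp]; exact List.mem_filter.mpr ⟨hk0, by simp [hk0m]⟩
    exact List.ne_nil_of_mem this
  obtain ⟨r, hr⟩ : ∃ r, PySem.List.max? temp (fun v => v) = some r := by
    cases hrr : PySem.List.max? temp (fun v => v) with
    | none => exact absurd ((PySem.List.max?_eq_none_iff _ _).mp hrr) htempne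
    | some r => exact ⟨r, rfl⟩
  rw [hr]
  simp only [Option.getD_some]
  have hr_temp : r ∈ temp := PySem.List.max?_mem hr
  have hr_max : ∀ y ∈ temp, y ≤ r := fun y hy => PySem.List.max?_isMax hr y hy
  obtain ⟨hr_ds, hr_m⟩ := List.mem_filter.mp hr_temp
  have hr_cnt : (lista.count r : Int) = m := by simpa using hr_m
  constructor
  · exact (PySem.Set.mem_ofList _ _).mp hr_ds
  · intro u hu
    have hu_ds : u ∈ PySem.Set.ofList lista := (PySem.Set.mem_ofList _ _).mpr hu
    have hu_le : (lista.count u : Int) ≤ m := by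
      apply hm_max
      rw [hvalues]
      exact List.mem_map_of_mem hu_ds
    by_cases hec : lista.count u = lista.count r
    · right
      refine ⟨hec, ?_⟩
      apply hr_max
      rw [htemp]
      refine List.mem_filter.mpr ⟨hu_ds, ?_⟩
      simp [hec, hr_cnt]
    · left
      have h1 : (lista.count u : Int) ≤ (lista.count r : Int) := hr_cnt ▸ hu_le
      have h2 : lista.count u ≤ lista.count r := by exact_mod_cast h1
      omega

-- structural facts about the leading run of a sorted list
theorem runFactsQ2 (x : Int) (rest : List Int) (hs : (x :: rest).Pairwise (· ≤ ·)) :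
    let run := rest.takeWhile (fun y => y == x)
    let rest' := rest.dropWhile (fun y => y == x)
    (x :: rest).count x = run.length + 1 ∧
    (∀ v ∈ rest', x < v) ∧
    (∀ v ∈ rest', (x :: rest).count v = rest'.count v) ∧
    (∀ v ∈ x :: rest, v = x ∨ v ∈ rest') ∧
    rest'.Pairwise (· ≤ ·) ∧ rest'.length ≤ rest.length := by
  intro run rest'
  have hrest'def : rest' = List.dropWhile (fun y => y == x) rest := rfl
  rw [List.pairwise_cons] at hs
  obtain ⟨hx, hrest⟩ := hs
  have hsplit : run ++ rest' = rest := List.takeWhile_append_dropWhile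
  have hrunx : ∀ v ∈ run, v = x := by
    intro v hv
    have := List.mem_takeWhile_imp hv
    simpa using this
  have hrest' : rest'.Pairwise (· ≤ ·) := List.Pairwise.sublist (List.dropWhile_sublist _) hrest
  have hlt : ∀ v ∈ rest', x < v := by
    cases hr' : rest' with
    | nil => simp
    | cons y ys =>
      intro v hv
      have hy : ¬ (y == x) = true := by
        have := List.head?_dropWhile_not (fun y => y == x) rest
        rw [← hrest'def, hr'] at this; simpa using this
      have hyx : y ≠ x := by simpa using hy
      have hymem : y ∈ rest := by
        have : y ∈ rest' := by rw [hr']; exact List.mem_cons_self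
        exact (List.dropWhile_sublist _).subset this
      have hxy : x < y := lt_of_le_of_ne (hx y hymem) (Ne.symm hyx)
      rcases List.mem_cons.mp hv with rfl | hv
      · exact hxy
      · have : y ≤ v := by
          rw [hr'] at hrest'
          exact (List.pairwise_cons.mp hrest').1 v hv
        omega
  have hxnot : x ∉ rest' := fun hm => absurd (hlt x hm) (lt_irrefl x)
  refine ⟨?_, hlt, ?_, ?_, hrest', List.length_dropWhile_le _ _⟩
  · have : rest.count x = run.length := by
      rw [← hsplit, List.count_append]
      have h1 : run.count x = run.length := by
        rw [List.count_eq_length]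
        intro b hb; exact (hrunx b hb).symm
      have h2 : rest'.count x = 0 := List.count_eq_zero.mpr hxnot
      omega
    simp [this]
  · intro v hv
    have hvx : v ≠ x := fun he => hxnot (he ▸ hv)
    rw [List.count_cons, ← hsplit, List.count_append]
    have h1 : run.count v = 0 := List.count_eq_zero.mpr (fun hm => hvx (hrunx v hm))
    simp [h1, Ne.symm hvx]
  · intro v hv
    rcases List.mem_cons.mp hv with rfl | hv
    · left; rfl
    · rw [← hsplit, List.mem_append] at hv
      rcases hv with hv | hv
      · left; exact hrunx v hv
      · right; exact hv

-- the run scan keeps the seed only if every run is strictly shorter than bestc; otherwise it ends on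
-- the greatest element whose count dominates every other (ties going to the larger value)
theorem pvRunsQ2_spec (n : Nat) : ∀ (s : List Int), s.length ≤ n → s.Pairwise (· ≤ ·) →
    ∀ (best : Int) (bestc : Nat),
    (pvRunsQ2 best bestc s = best ∧ ∀ v ∈ s, s.count v < bestc) ∨
    (pvRunsQ2 best bestc s ∈ s ∧ bestc ≤ s.count (pvRunsQ2 best bestc s) ∧
      ∀ v ∈ s, s.count v < s.count (pvRunsQ2 best bestc s) ∨
        (s.count v = s.count (pvRunsQ2 best bestc s) ∧ v ≤ pvRunsQ2 best bestc s)) := by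
  induction n with
  | zero =>
    intro s hlen _ best bestc
    have : s = [] := List.length_eq_zero_iff.mp (Nat.le_zero.mp hlen)
    subst this
    left; constructor
    · simp [pvRunsQ2]
    · intro v hv; simp at hv
  | succ n ih =>
    intro s hlen hsort best bestc
    cases s with
    | nil =>
      left; constructor
      · simp [pvRunsQ2]
      · intro v hv; simp at hv
    | cons x rest =>
      obtain ⟨hcnt, hlt, hcnt', hmem, hrest'sort, hlen'⟩ := runFactsQ2 x rest hsort
      set run := rest.takeWhile (fun y => y == x) with hrun
      set rest' := rest.dropWhile (fun y => y == x) with hrest'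
      set c := run.length + 1 with hc
      have hstep : ∀ b bc, pvRunsQ2 b bc (x :: rest) =
          if bc ≤ c then pvRunsQ2 x c rest' else pvRunsQ2 b bc rest' := by
        intro b bc; rw [pvRunsQ2]
      have hlen'' : rest'.length ≤ n := by
        simp only [List.length_cons] at hlen; omega
      by_cases hb : bestc ≤ c
      · rw [hstep, if_pos hb]
        rcases ih rest' hlen'' hrest'sort x c with ⟨heq, hall⟩ | ⟨hm, hbc, hall⟩
        · right
          rw [heq]
          refine ⟨List.mem_cons_self, by omega, ?_⟩
          intro v hv
          rcases hmem v hv with rfl | hv'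
          · right; exact ⟨rfl, le_refl v⟩
          · left
            rw [hcnt' v hv', hcnt]
            exact lt_of_lt_of_le (hall v hv') (by omega)
        · right
          set r := pvRunsQ2 x c rest' with hr
          have hrs : r ∈ x :: rest := by
            right
            exact (List.dropWhile_sublist _).subset hm
          have hcr : (x :: rest).count r = rest'.count r := hcnt' r hm
          refine ⟨hrs, by omega, ?_⟩
          intro v hv
          rcases hmem v hv with rfl | hv'
          · rcases Nat.lt_or_ge c (rest'.count r) with hcc | hcc
            · left; omega
            · right
              have : c = rest'.count r := by omega
              exact ⟨by omega, le_of_lt (hlt r hm)⟩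
          · rw [hcnt' v hv', hcr]
            exact hall v hv'
      · rw [hstep, if_neg hb]
        rcases ih rest' hlen'' hrest'sort best bestc with ⟨heq, hall⟩ | ⟨hm, hbc, hall⟩
        · left
          refine ⟨heq, ?_⟩
          intro v hv
          rcases hmem v hv with rfl | hv'
          · omega
          · rw [hcnt' v hv']; exact hall v hv'
        · right
          set r := pvRunsQ2 best bestc rest' with hr
          have hcr : (x :: rest).count r = rest'.count r := hcnt' r hm
          refine ⟨List.mem_cons_of_mem _ ((List.dropWhile_sublist _).subset hm), by omega, ?_⟩
          intro v hv
          rcases hmem v hv with rfl | hv'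
          · left; omega
          · rw [hcnt' v hv', hcr]; exact hall v hv'

-- B's result is the greatest most-frequent element
theorem B_isBest (lista : List Int) (h : lista ≠ []) : IsBestQ2 lista (questao_2_A_alt lista) := by
  have hperm : (PySem.List.sorted lista (fun x => x) false).Perm lista :=
    PySem.List.sorted_perm lista (fun x => x) false
  cases hs : PySem.List.sorted lista (fun x => x) false with
  | nil =>
    exact absurd ((PySem.List.sorted_eq_nil_iff _ _ _).mp hs) h
  | cons x t =>
    have hsort : (x :: t).Pairwise (· ≤ ·) := by
      have := PySem.List.sorted_pairwise (xs := lista) (key := fun x => x)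
      rw [hs] at this
      simpa using this
    rw [hs] at hperm
    simp only [questao_2_A_alt, hs]
    rcases pvRunsQ2_spec (x :: t).length (x :: t) le_rfl hsort x 0 with ⟨_, hall⟩ | ⟨hm, _, hall⟩
    · exfalso
      have := hall x List.mem_cons_self
      omega
    · constructor
      · exact hperm.mem_iff.mp hm
      · intro u hu
        have hu' : u ∈ x :: t := hperm.mem_iff.mpr hu
        have hc : ∀ z : Int, (x :: t).count z = lista.count z := fun z => hperm.count_eq z
        rcases hall u hu' with h1 | ⟨h1, h2⟩
        · left; rw [← hc u, ← hc (pvRunsQ2 x 0 (x :: t))]; exact h1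
        · right; exact ⟨by rw [← hc u, ← hc (pvRunsQ2 x 0 (x :: t))]; exact h1, h2⟩

-- ===== VERDICT (by name: the statement is the Claim_ definition above) =====
theorem questao_2_A_spec : Claim_equal_questao_2_A := by
  intro lista _ hpre
  unfold Spec_questao_2_A
  exact isBestQ2_unique (A_isBest lista hpre) (B_isBest lista hpre)
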